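-- pv_equiv track=rewrite | github.com/MBinAsif/Echo_backend | navigation/views.py | classify_environment
-- ===== SOURCE A (Python) =====
-- def classify_environment(objects):
--     street_keywords = {"car", "truck", "bus", "traffic light", "stop sign", "bicycle"}
--     indoor_keywords = {"chair", "window", "door", "table", "bed", "tv", "laptop", "cell phone"}
--
--     street_score = sum(1 for obj in objects if obj['label'] in street_keywords)
--     indoor_score = sum(1 for obj in objects if obj['label'] in indoor_keywords)
--
--     if street_score > indoor_score:
--         return "street"
--     elif indoor_score > street_score:
--         return "indoor"
--     else:
--         return "unknown"
-- ===== SOURCE B (Python) =====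
-- def classify_environment(objects):
--     street_keywords = {"car", "truck", "bus", "traffic light", "stop sign", "bicycle"}
--     indoor_keywords = {"chair", "window", "door", "table", "bed", "tv", "laptop", "cell phone"}
--
--     diff = 0
--     for obj in objects:
--         label = obj['label']
--         if label in street_keywords:
--             diff += 1
--         elif label in indoor_keywords:
--             diff -= 1
--     if diff > 0:
--         return "street"
--     if diff < 0:
--         return "indoor"
--     return "unknown"
-- ===== Notes on version B (the rewrite author's own statement) =====
-- stated objective: alternative
-- what changed: B makes a single pass keeping one signed accumulator (+1 for street labels, -1 for indoor labels, using that the keyword sets are disjoint) and classifies by the sign of the difference, instead of A's two separate scans producing two scores that are then compared.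
import Mathlib
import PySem

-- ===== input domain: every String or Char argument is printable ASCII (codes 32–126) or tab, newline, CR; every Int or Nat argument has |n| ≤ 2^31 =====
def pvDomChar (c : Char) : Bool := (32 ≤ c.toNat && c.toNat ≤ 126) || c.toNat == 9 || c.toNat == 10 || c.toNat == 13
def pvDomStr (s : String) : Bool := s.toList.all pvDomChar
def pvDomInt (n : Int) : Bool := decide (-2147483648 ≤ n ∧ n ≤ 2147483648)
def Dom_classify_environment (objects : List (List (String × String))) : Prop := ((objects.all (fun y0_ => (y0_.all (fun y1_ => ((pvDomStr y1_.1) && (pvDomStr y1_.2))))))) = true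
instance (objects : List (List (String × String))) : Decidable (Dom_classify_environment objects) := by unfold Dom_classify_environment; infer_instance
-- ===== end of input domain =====

-- B replaces A's two scans and two scores with one pass over the objects keeping a single signed accumulator (street +1 / indoor -1, the keyword sets being disjoint) classified by its sign (alternative decomposition, same cost).


-- ===== PORT A =====
-- street_keywords / indoor_keywords: Python set literals
def pvStreetA : List String := PySem.Set.ofList ["car", "truck", "bus", "traffic light", "stop sign", "bicycle"]
def pvIndoorA : List String := PySem.Set.ofList ["chair", "window", "door", "table", "bed", "tv", "laptop", "cell phone"]
-- obj['label']; total default "" is only reached outside Pre_ (Python raises KeyError there)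
def pvLabelA (obj : List (String × String)) : String := ((PySem.Dict.mk obj).get? "label").getD ""

def classify_environment (objects : List (List (String × String))) : String :=
  let street_score := objects.foldl (fun acc obj => if pvLabelA obj ∈ pvStreetA then acc + 1 else acc) (0 : Int)
  let indoor_score := objects.foldl (fun acc obj => if pvLabelA obj ∈ pvIndoorA then acc + 1 else acc) (0 : Int)
  if street_score > indoor_score then "street"
  else if indoor_score > street_score then "indoor"
  else "unknown"

-- ===== PORT B =====
def pvStreetB : List String := PySem.Set.ofList ["car", "truck", "bus", "traffic light", "stop sign", "bicycle"]
def pvIndoorB : List String := PySem.Set.ofList ["chair", "window", "door", "table", "bed", "tv", "laptop", "cell phone"]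
def pvLabelB (obj : List (String × String)) : String := ((PySem.Dict.mk obj).get? "label").getD ""

-- the single loop of B: threads the signed accumulator, then the sign test
def pvGoB : List (List (String × String)) → Int → String
  | [], diff => if diff > 0 then "street" else if diff < 0 then "indoor" else "unknown"
  | obj :: rest, diff =>
    let label := pvLabelB obj
    pvGoB rest (if label ∈ pvStreetB then diff + 1 else if label ∈ pvIndoorB then diff - 1 else diff)

def classify_environment_alt (objects : List (List (String × String))) : String :=
  pvGoB objects 0

-- ===== PRECONDITION & SPEC =====
-- Pre_ excludes objects lacking a 'label' key: Python A raises KeyError there (and B raises too).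
def Pre_classify_environment (objects : List (List (String × String))) : Prop :=
  (objects.all (fun obj => (PySem.Dict.mk obj).contains "label")) = true
instance (objects : List (List (String × String))) : Decidable (Pre_classify_environment objects) := by unfold Pre_classify_environment; infer_instance
def pvWitness_classify_environment : (List (List (String × String))) := [[("label", "car")], [("label", "chair")], [("label", "bus")]]

def Spec_classify_environment (objects : List (List (String × String))) (out : String) : Prop := out = classify_environment_alt objects
instance (objects : List (List (String × String))) (out : String) : Decidable (Spec_classify_environment objects out) := by unfold Spec_classify_environment; infer_instance

-- ===== CLAIM (what is proved, stated in full; the proofs are below) =====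
def Claim_equal_classify_environment : Prop := ∀ (objects : List (List (String × String))), Dom_classify_environment objects → Pre_classify_environment objects → Spec_classify_environment objects (classify_environment objects)

-- ===== LEMMAS AND PROOFS =====

-- the two keyword sets are disjoint, so one signed accumulator can carry both counts
lemma street_not_indoor (x : String) (h : x ∈ pvStreetB) : x ∉ pvIndoorB := by
  simp only [pvStreetB, pvIndoorB, PySem.Set.ofList] at *
  fin_cases h <;> decide

-- B's loop computes the sign of (street count − indoor count), shifted by the accumulator
lemma pvGoB_spec (objects : List (List (String × String))) (d : Int) :
    pvGoB objects d =
      (if d + (objects.countP (fun o => decide (pvLabelB o ∈ pvStreetB)) : Int)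
            - (objects.countP (fun o => decide (pvLabelB o ∈ pvIndoorB)) : Int) > 0 then "street"
       else if d + (objects.countP (fun o => decide (pvLabelB o ∈ pvStreetB)) : Int)
            - (objects.countP (fun o => decide (pvLabelB o ∈ pvIndoorB)) : Int) < 0 then "indoor"
       else "unknown") := by
  induction objects generalizing d with
  | nil => simp [pvGoB]
  | cons obj rest ih =>
    simp only [pvGoB, List.countP_cons]
    by_cases hs : pvLabelB obj ∈ pvStreetB
    · have hi := street_not_indoor _ hs
      rw [ih]
      simp only [hs, hi, decide_true, decide_false, if_true]
      push_cast
      congr 1 <;> [(congr 1; omega); (congr 1; congr 1; omega)]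
    · by_cases hi : pvLabelB obj ∈ pvIndoorB
      · rw [ih]
        simp only [hs, hi, decide_true, decide_false, if_false, if_true]
        push_cast
        congr 1 <;> [(congr 1; omega); (congr 1; congr 1; omega)]
      · rw [ih]
        simp [hs, hi]

-- ===== VERDICT (by name: the statement is the Claim_ definition above) =====
theorem classify_environment_spec : Claim_equal_classify_environment := by
  intro objects _hdom _hpre
  unfold Spec_classify_environment classify_environment classify_environment_alt
  rw [pvGoB_spec]
  have hA1 := PySem.List.foldl_ite_add_one (fun obj => pvLabelA obj ∈ pvStreetA) objects 0
  have hA2 := PySem.List.foldl_ite_add_one (fun obj => pvLabelA obj ∈ pvIndoorA) objects 0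
  rw [hA1, hA2]
  have hc1 : objects.countP (fun obj => decide (pvLabelA obj ∈ pvStreetA))
      = objects.countP (fun o => decide (pvLabelB o ∈ pvStreetB)) := rfl
  have hc2 : objects.countP (fun obj => decide (pvLabelA obj ∈ pvIndoorA))
      = objects.countP (fun o => decide (pvLabelB o ∈ pvIndoorB)) := rfl
  rw [hc1, hc2]
  simp only [zero_add]
  split_ifs <;> first | rfl | omega
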